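-- pv_equiv track=rewrite | github.com/Sergitxin22/Prog1 | 2. Exámenes segundo parcial/curso 2022-23/Examen Pablo/solucion_examen_pablo.py | limpiar_tabla
-- ===== SOURCE A (Python) =====
-- def limpiar_tabla(tabla, n):
--     tabla_limpia = tabla.copy()
--     filas_vacias = 0
--
--     for i in range(len(tabla_limpia)):
--         fila = tabla_limpia[i]
--
--         for j in range(len(fila)):
--             if n in fila:
--                 fila.remove(n)
--         if len(fila) == 0:
--             filas_vacias += 1
--
--     for _ in range(filas_vacias):
--         tabla_limpia.remove([])
--
--     return tabla_limpia
-- ===== SOURCE B (Python) =====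
-- def limpiar_tabla(tabla, n):
--     resultado = []
--     for fila in tabla:
--         while n in fila:
--             fila.remove(n)
--         if fila:
--             resultado.append(fila)
--     return resultado
-- ===== Notes on version B (the rewrite author's own statement) =====
-- stated objective: faster
-- what changed: Replaced A's three-phase shape (remove n len(fila) times per row over a shallow copy, count empty rows, then delete that many [] afterwards) with a single pass that strips each row in place with a while-loop (stopping as soon as n is gone) and appends it to a fresh result list only if non-empty.
import Mathlib
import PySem

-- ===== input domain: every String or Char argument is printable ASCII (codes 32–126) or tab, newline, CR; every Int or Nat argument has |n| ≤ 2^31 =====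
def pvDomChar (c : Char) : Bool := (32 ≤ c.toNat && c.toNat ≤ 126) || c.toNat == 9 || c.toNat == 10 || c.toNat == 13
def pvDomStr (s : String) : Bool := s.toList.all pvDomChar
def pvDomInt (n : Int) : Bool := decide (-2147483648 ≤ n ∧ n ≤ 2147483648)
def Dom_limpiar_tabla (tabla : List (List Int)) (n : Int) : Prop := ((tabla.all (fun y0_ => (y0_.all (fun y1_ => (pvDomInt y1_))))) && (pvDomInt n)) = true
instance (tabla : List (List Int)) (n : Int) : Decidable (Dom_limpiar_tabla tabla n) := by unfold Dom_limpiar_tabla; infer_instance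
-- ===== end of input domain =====

-- B is one accumulate-while-filtering pass (strip each row, keep it only if non-empty) instead of
-- A's three phases; both Pythons mutate the shared row objects in place — the theorem is about the
-- return value (which here determines the mutation as well).

-- ===== PORT A =====

-- list.remove(x): drop the first occurrence (both Pythons only call it when x is present)
def pvRemoveFirst {α : Type} [DecidableEq α] (a : α) : List α → List α
  | [] => []
  | x :: t => if x = a then t else x :: pvRemoveFirst a t

-- `for j in range(len(fila)): if n in fila: fila.remove(n)` — the range length is the fuel
def pvInnerA (n : Int) : Nat → List Int → List Int
  | 0, f => f
  | k + 1, f => pvInnerA n k (if n ∈ f then pvRemoveFirst n f else f)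

-- `for _ in range(filas_vacias): tabla_limpia.remove([])`
def pvIterRemove {α : Type} [DecidableEq α] (a : α) : Nat → List α → List α
  | 0, l => l
  | k + 1, l => pvIterRemove a k (pvRemoveFirst a l)

def limpiar_tabla (tabla : List (List Int)) (n : Int) : List (List Int) :=
  let res := tabla.foldl
    (fun (acc : List (List Int) × Nat) fila =>
      let f := pvInnerA n fila.length fila
      (acc.1 ++ [f], if f.length = 0 then acc.2 + 1 else acc.2))
    ([], 0)
  pvIterRemove [] res.2 res.1

-- ===== PORT B =====

theorem pvRemoveFirst_length_lt {α : Type} [DecidableEq α] (a : α) :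
    ∀ f : List α, a ∈ f → (pvRemoveFirst a f).length < f.length := by
  intro f hf
  induction f with
  | nil => cases hf
  | cons x t ih =>
    simp only [pvRemoveFirst]
    by_cases hx : x = a
    · simp [hx]
    · rcases List.mem_cons.mp hf with h | h
      · exact absurd h.symm hx
      · simp only [if_neg hx, List.length_cons]
        exact Nat.succ_lt_succ (ih h)

-- `while n in fila: fila.remove(n)`
def pvStripB (n : Int) (fila : List Int) : List Int :=
  if h : n ∈ fila then pvStripB n (pvRemoveFirst n fila) else fila
termination_by fila.length
decreasing_by exact pvRemoveFirst_length_lt n fila h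

def limpiar_tabla_alt (tabla : List (List Int)) (n : Int) : List (List Int) :=
  match tabla with
  | [] => []
  | fila :: rest =>
    let f := pvStripB n fila
    if f = [] then limpiar_tabla_alt rest n else f :: limpiar_tabla_alt rest n

-- ===== PRECONDITION & SPEC =====
def Spec_limpiar_tabla (tabla : List (List Int)) (n : Int) (out : List (List Int)) : Prop := out = limpiar_tabla_alt tabla n
instance (tabla : List (List Int)) (n : Int) (out : List (List Int)) : Decidable (Spec_limpiar_tabla tabla n out) := by unfold Spec_limpiar_tabla; infer_instance

-- ===== CLAIM (what is proved, stated in full; the proofs are below) =====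
def Claim_equal_limpiar_tabla : Prop := ∀ (tabla : List (List Int)) (n : Int), Dom_limpiar_tabla tabla n → Spec_limpiar_tabla tabla n (limpiar_tabla tabla n)

-- ===== LEMMAS AND PROOFS =====

theorem filter_removeFirst (n : Int) :
    ∀ f : List Int, (pvRemoveFirst n f).filter (· ≠ n) = f.filter (· ≠ n) := by
  intro f
  induction f with
  | nil => rfl
  | cons x t ih =>
    simp only [pvRemoveFirst]
    by_cases hx : x = n
    · subst hx; simp [List.filter_cons]
    · rw [if_neg hx, List.filter_cons, List.filter_cons, ih]

theorem filter_eq_self_of_not_mem (n : Int) (f : List Int) (h : n ∉ f) :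
    f.filter (· ≠ n) = f := by
  apply List.filter_eq_self.mpr
  intro a ha
  simp only [decide_eq_true_eq]
  intro he; exact h (he ▸ ha)

theorem count_removeFirst (n : Int) :
    ∀ f : List Int, n ∈ f → (pvRemoveFirst n f).count n = f.count n - 1 := by
  intro f hf
  induction f with
  | nil => cases hf
  | cons x t ih =>
    simp only [pvRemoveFirst]
    by_cases hx : x = n
    · subst hx; simp [List.count_cons_self]
    · rcases List.mem_cons.mp hf with h | h
      · exact absurd h.symm hx
      · have ht : n ∈ t := h
        have hcnt : 0 < t.count n := List.count_pos_iff.mpr ht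
        have hb : (x == n) = false := by simp [hx]
        simp only [if_neg hx, List.count_cons, ih ht, hb]
        simp

theorem innerA_eq_filter (n : Int) :
    ∀ (k : Nat) (f : List Int), f.count n ≤ k → pvInnerA n k f = f.filter (· ≠ n) := by
  intro k
  induction k with
  | zero =>
    intro f h
    have hnm : n ∉ f := by
      intro hm
      have := List.count_pos_iff.mpr hm
      omega
    simp only [pvInnerA]
    exact (filter_eq_self_of_not_mem n f hnm).symm
  | succ k ih =>
    intro f h
    simp only [pvInnerA]
    by_cases hm : n ∈ f
    · rw [if_pos hm, ih _ (by
        have := count_removeFirst n f hm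
        have hpos : 0 < f.count n := List.count_pos_iff.mpr hm
        omega)]
      exact filter_removeFirst n f
    · rw [if_neg hm, ih _ (by
        have : f.count n = 0 := List.count_eq_zero.mpr hm
        omega)]

theorem stripB_eq_filter (n : Int) (f : List Int) :
    pvStripB n f = f.filter (· ≠ n) := by
  induction f using pvStripB.induct n with
  | case1 f hm ih =>
    rw [pvStripB, dif_pos hm, ih, filter_removeFirst]
  | case2 f hm =>
    rw [pvStripB, dif_neg hm, filter_eq_self_of_not_mem n f hm]

theorem iterRemove_cons_ne {α : Type} [DecidableEq α] (a x : α) (hx : x ≠ a) :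
    ∀ (k : Nat) (t : List α), pvIterRemove a k (x :: t) = x :: pvIterRemove a k t := by
  intro k
  induction k with
  | zero => intro t; rfl
  | succ k ih =>
    intro t
    simp only [pvIterRemove, pvRemoveFirst, if_neg hx, ih]

theorem iterRemove_count_nil :
    ∀ l : List (List Int), pvIterRemove ([] : List Int) (l.count []) l = l.filter (· ≠ ([] : List Int)) := by
  intro l
  induction l with
  | nil => rfl
  | cons x t ih =>
    by_cases hx : x = ([] : List Int)
    · subst hx
      rw [List.count_cons_self]
      simp only [pvIterRemove]
      rw [show pvRemoveFirst ([] : List Int) ([] :: t) = t from by simp [pvRemoveFirst]]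
      rw [ih, List.filter_cons]
      simp
    · have hb : (x == ([] : List Int)) = false := by simp [hx]
      have hc : (x :: t).count ([] : List Int) = t.count [] := by simp [List.count_cons, hb]
      rw [hc, iterRemove_cons_ne ([] : List Int) x hx, ih, List.filter_cons]
      simp [hx]

theorem foldl_A (n : Int) :
    ∀ (tabla : List (List Int)) (acc : List (List Int)) (v : Nat),
      tabla.foldl
        (fun (p : List (List Int) × Nat) fila =>
          let f := pvInnerA n fila.length fila
          (p.1 ++ [f], if f.length = 0 then p.2 + 1 else p.2))
        (acc, v)
      = (acc ++ tabla.map (fun f => f.filter (· ≠ n)),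
         v + (tabla.map (fun f => f.filter (· ≠ n))).count []) := by
  intro tabla
  induction tabla with
  | nil => intro acc v; simp
  | cons fila rest ih =>
    intro acc v
    have hstrip : pvInnerA n fila.length fila = fila.filter (· ≠ n) :=
      innerA_eq_filter n fila.length fila List.count_le_length
    simp only [List.foldl_cons, hstrip]
    rw [ih, List.map_cons, List.count_cons]
    by_cases hF : fila.filter (· ≠ n) = []
    · rw [hF]
      simp only [Prod.mk.injEq, List.length_nil, List.append_assoc, List.singleton_append,
        beq_self_eq_true, if_true, reduceIte]
      exact ⟨trivial, by omega⟩
    · have hl : ¬ (fila.filter (· ≠ n)).length = 0 := by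
        simpa [List.length_eq_zero_iff] using hF
      rw [if_neg hl]
      have hb : ((fila.filter (· ≠ n)) == ([] : List Int)) = false := by
        simpa using hF
      rw [hb, if_neg (by simp)]
      simp only [Prod.mk.injEq]
      exact ⟨by simp, rfl⟩

theorem alt_eq_filter (n : Int) :
    ∀ tabla : List (List Int),
      limpiar_tabla_alt tabla n
        = (tabla.map (fun f => f.filter (· ≠ n))).filter (· ≠ ([] : List Int)) := by
  intro tabla
  induction tabla with
  | nil => rfl
  | cons fila rest ih =>
    simp only [limpiar_tabla_alt, stripB_eq_filter n fila, List.map_cons, List.filter_cons]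
    by_cases he : fila.filter (· ≠ n) = []
    · rw [if_pos he, ih]
      have hd : (decide ((fila.filter (· ≠ n)) ≠ ([] : List Int))) = false :=
        decide_eq_false (not_not_intro he)
      rw [hd, if_neg (by simp)]
    · rw [if_neg he, ih]
      have hd : (decide ((fila.filter (· ≠ n)) ≠ ([] : List Int))) = true :=
        decide_eq_true he
      rw [hd, if_pos rfl]

-- ===== VERDICT (by name: the statement is the Claim_ definition above) =====
theorem limpiar_tabla_spec : Claim_equal_limpiar_tabla := by
  intro tabla n _
  unfold Spec_limpiar_tabla limpiar_tabla
  simp only [foldl_A n tabla [] 0, Nat.zero_add, List.nil_append]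
  rw [iterRemove_count_nil (tabla.map (fun f => f.filter (· ≠ n))), alt_eq_filter]
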